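-- pv_equiv track=rewrite | github.com/ejfn/advent-of-code | 2017/17/day17.py | part1
-- ===== SOURCE A (Python) =====
-- def part1(steps):
--     """Value after 2017 in the circular buffer."""
--     buffer = [0]
--     pos = 0
--
--     for i in range(1, 2018):
--         pos = (pos + steps) % len(buffer)
--         buffer.insert(pos + 1, i)
--         pos = pos + 1
--
--     return buffer[(pos + 1) % len(buffer)]
-- ===== SOURCE B (Python) =====
-- def part1(steps):
--     """Value after 2017 in the circular buffer."""
--     buf = [0]
--     for i in range(1, 2018):
--         k = steps % len(buf)
--         buf = buf[k:] + buf[:k]   # rotate left so the current value ends up last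
--         buf.append(i)
--     return buf[0]
-- ===== Notes on version B (the rewrite author's own statement) =====
-- stated objective: idiomatic
-- what changed: B replaces the explicit position pointer and modulo-index insertion by a deque-style rotation: each step rotates the buffer left by steps mod len so the current value is always last, appends i, and finally reads buf[0] (the element circularly after 2017).
import Mathlib
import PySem

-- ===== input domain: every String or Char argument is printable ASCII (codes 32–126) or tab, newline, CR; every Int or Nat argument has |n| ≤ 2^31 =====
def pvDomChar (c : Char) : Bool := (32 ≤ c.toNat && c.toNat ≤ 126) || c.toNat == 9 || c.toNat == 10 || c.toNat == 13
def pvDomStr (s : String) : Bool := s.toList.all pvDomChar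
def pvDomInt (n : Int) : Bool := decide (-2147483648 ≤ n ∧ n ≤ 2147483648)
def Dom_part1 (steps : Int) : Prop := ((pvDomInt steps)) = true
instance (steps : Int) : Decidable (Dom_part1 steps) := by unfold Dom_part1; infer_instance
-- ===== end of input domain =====

-- B keeps the current value at the right end and rotates the buffer instead of tracking a
-- position index; same cost, more idiomatic (deque-style). Return value only.

-- ===== PORT A =====
-- one loop body of A: pos = (pos + steps) % len(buffer); buffer.insert(pos + 1, i); pos = pos + 1
def part1Step (steps : Int) (st : List Int × Int) (i : Int) : List Int × Int :=
  let pos := PySem.Int.mod (st.2 + steps) (PySem.List.len st.1)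
  (PySem.List.insert st.1 (pos + 1) i, pos + 1)

def part1 (steps : Int) : Int :=
  let st := (PySem.List.pyRange 1 2018 1).foldl (part1Step steps) ([0], 0)
  -- buffer[(pos + 1) % len(buffer)]: the index is always in range, so getD's default is never used
  (PySem.List.pyGet? st.1 (PySem.Int.mod (st.2 + 1) (PySem.List.len st.1))).getD 0

-- ===== PORT B =====
-- one loop body of B: k = steps % len(buf); buf = buf[k:] + buf[:k]; buf.append(i)
def part1AltStep (steps : Int) (buf : List Int) (i : Int) : List Int :=
  let k := PySem.Int.mod steps (PySem.List.len buf)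
  (PySem.List.slice buf (some k) none ++ PySem.List.slice buf none (some k)) ++ [i]

def part1_alt (steps : Int) : Int :=
  let buf := (PySem.List.pyRange 1 2018 1).foldl (part1AltStep steps) [0]
  (PySem.List.pyGet? buf 0).getD 0

-- ===== PRECONDITION & SPEC =====
def Spec_part1 (steps : Int) (out : Int) : Prop := out = part1_alt steps
instance (steps : Int) (out : Int) : Decidable (Spec_part1 steps out) := by unfold Spec_part1; infer_instance

-- ===== CLAIM (what is proved, stated in full; the proofs are below) =====
def Claim_equal_part1 : Prop := ∀ (steps : Int), Dom_part1 steps → Spec_part1 steps (part1 steps)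

-- ===== LEMMAS AND PROOFS =====

-- Invariant: A's state (buffer, pos) has pos in range, and B's buffer is A's rotated left by
-- pos + 1 (so A's "current" value sits at B's right end).
def SpinInv (st : List Int × Int) (buf : List Int) : Prop :=
  0 ≤ st.2 ∧ st.2 < (st.1.length : Int) ∧ buf = st.1.rotate (st.2 + 1).toNat

lemma spinInv_step (steps i : Int) (st : List Int × Int) (buf : List Int)
    (h : SpinInv st buf) : SpinInv (part1Step steps st i) (part1AltStep steps buf i) := by
  obtain ⟨buffer, pos⟩ := st
  obtain ⟨h0, h1, h2⟩ := h
  simp only at h0 h1 h2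
  set L := buffer.length with hLdef
  have hL : 0 < (L : Int) := by omega
  have hlenbuf : buf.length = L := by rw [h2, List.length_rotate]
  set n : Nat := (pos + 1).toNat with hndef
  have hn : (n : Int) = pos + 1 := by omega
  have hnL : n ≤ L := by omega
  -- A's new position
  set pos1 := PySem.Int.mod (pos + steps) (L : Int) with hpos1
  have hp0 : 0 ≤ pos1 := PySem.Int.mod_nonneg _ hL
  have hp1 : pos1 < L := PySem.Int.mod_lt _ hL
  set b : Nat := (pos1 + 1).toNat with hbdef
  have hb : (b : Int) = pos1 + 1 := by omega
  have hbL : b ≤ L := by omega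
  -- B's rotation amount
  set k := PySem.Int.mod steps (L : Int) with hkdef
  have hk0 : 0 ≤ k := PySem.Int.mod_nonneg _ hL
  have hk1 : k < L := PySem.Int.mod_lt _ hL
  -- unfold both steps
  unfold part1Step part1AltStep
  simp only [PySem.List.len_eq, hlenbuf, ← hLdef, ← hpos1, ← hkdef]
  rw [← hb, PySem.List.insert_natCast buffer b i hbL]
  rw [PySem.List.slice_from _ hk0, PySem.List.slice_to _ hk0]
  refine ⟨by omega, ?_, ?_⟩
  · simp only [List.length_append, List.length_cons, List.length_take, List.length_drop]
    omega
  · -- the list equality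
    dsimp only
    have hbuf' : buf.drop k.toNat ++ buf.take k.toNat = buf.rotate k.toNat :=
      (List.rotate_eq_drop_append_take (by omega)).symm
    have hrot : buf.rotate k.toNat = buffer.rotate (n + k.toNat) := by
      rw [h2, List.rotate_rotate]
    have hkey : (n + k.toNat) % L = b % L := by
      have m1 : Int.ModEq (L : Int) (steps % L) steps := Int.emod_emod_of_dvd steps dvd_rfl
      have m2 : Int.ModEq (L : Int) ((pos + steps) % L) (pos + steps) :=
        Int.emod_emod_of_dvd _ dvd_rfl
      have e1 : Int.ModEq (L : Int) (pos + 1 + steps % L) ((pos + steps) % L + 1) := by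
        calc (pos + 1 + steps % L) ≡ pos + 1 + steps [ZMOD (L:Int)] := m1.add_left _
          _ = pos + steps + 1 := by ring
          _ ≡ (pos + steps) % L + 1 [ZMOD (L:Int)] := m2.symm.add_right 1
      have ecast : ((n + k.toNat : Nat) : Int) % L = ((b : Nat) : Int) % L := by
        push_cast
        rw [hn, hb]
        have hkk : ((k.toNat : Int)) = k := by omega
        rw [hkk]
        have : k = steps % L := by
          rw [hkdef, PySem.Int.mod_eq_emod_of_pos hL]
        rw [this]
        have : pos1 = (pos + steps) % L := by
          rw [hpos1, PySem.Int.mod_eq_emod_of_pos hL]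
        rw [this]
        exact e1
      have : ((n + k.toNat) % L : Nat) = ((b % L : Nat)) := by
        have c1 : (((n + k.toNat) % L : Nat) : Int) = ((b % L : Nat) : Int) := by
          push_cast
          exact ecast
        exact_mod_cast c1
      exact this
    have hrotb : buffer.rotate (n + k.toNat) = buffer.rotate b := by
      rw [← List.rotate_mod buffer (n + k.toNat), hkey, List.rotate_mod]
    -- now compute the target rotation
    have htb : (buffer.take b ++ [i]).length = b + 1 := by
      simp [List.length_take]; omega
    have htarget : (buffer.take b ++ i :: buffer.drop b).rotate (((b : Int) + 1).toNat)
        = buffer.rotate b ++ [i] := by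
      have hidx : ((b : Int) + 1).toNat = b + 1 := by omega
      rw [hidx]
      have hsplit : buffer.take b ++ i :: buffer.drop b
          = (buffer.take b ++ [i]) ++ buffer.drop b := by simp
      rw [hsplit, List.rotate_eq_drop_append_take (by simp; omega)]
      rw [← htb, List.drop_left, List.take_left]
      rw [List.rotate_eq_drop_append_take hbL]
      simp
    rw [htarget, ← hrotb, ← hrot, ← hbuf']

lemma spinInv_foldl (steps : Int) (l : List Int) (st : List Int × Int) (buf : List Int)
    (h : SpinInv st buf) :
    SpinInv (l.foldl (part1Step steps) st) (l.foldl (part1AltStep steps) buf) := by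
  induction l generalizing st buf with
  | nil => exact h
  | cons x xs ih => exact ih _ _ (spinInv_step steps x st buf h)

-- At the end of both loops the two reads pick the same element of the same circular buffer.
lemma spinInv_final (buffer : List Int) (pos : Int) (buf : List Int)
    (h0 : 0 ≤ pos) (h1 : pos < (buffer.length : Int))
    (h2 : buf = buffer.rotate (pos + 1).toNat) :
    (PySem.List.pyGet? buffer (PySem.Int.mod (pos + 1) (PySem.List.len buffer))).getD 0
      = (PySem.List.pyGet? buf 0).getD 0 := by
  set L := buffer.length with hLdef
  have hL : 0 < (L : Int) := by omega
  set n : Nat := (pos + 1).toNat with hndef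
  have hn : (n : Int) = pos + 1 := by omega
  simp only [PySem.List.len_eq, ← hLdef]
  rw [PySem.Int.mod_eq_emod_of_pos hL]
  have hge : 0 ≤ (pos + 1) % (L : Int) := Int.emod_nonneg _ (by omega)
  rw [PySem.List.pyGet?_of_nonneg buffer hge]
  have hlt : ((pos + 1) % (L : Int)).toNat < L := by
    have := Int.emod_lt_of_pos (pos + 1) hL
    omega
  have hidx : ((pos + 1) % (L : Int)).toNat = (0 + n) % L := by
    have hmod : (pos + 1) % (L : Int) = ((n % L : Nat) : Int) := by
      push_cast
      rw [hn]
    rw [Nat.zero_add]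
    omega
  rw [h2]
  have hbuflen : 0 < (buffer.rotate n).length := by rw [List.length_rotate]; omega
  rw [show (0 : Int) = ((0 : Nat) : Int) by rfl, PySem.List.pyGet?_natCast]
  rw [List.getElem?_eq_getElem hbuflen, List.getElem_rotate]
  rw [List.getElem?_eq_getElem (by omega : ((pos + 1) % (L : Int)).toNat < buffer.length)]
  simp only [Option.getD_some]
  congr 1

-- ===== VERDICT (by name: the statement is the Claim_ definition above) =====
theorem part1_spec : Claim_equal_part1 := by
  intro steps _
  unfold Spec_part1 part1 part1_alt
  obtain ⟨h0, h1, h2⟩ := spinInv_foldl steps (PySem.List.pyRange 1 2018 1) ([0], 0) [0]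
    ⟨by decide, by decide, by decide⟩
  exact spinInv_final _ _ _ h0 h1 h2
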